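-- pv_equiv track=rewrite | github.com/bordercore/bordercore-ai | modules/util.py | sort_models
-- ===== SOURCE A (Python) =====
-- from typing import Any, Dict, List
--
-- def sort_models(
--     original_list: List[Dict[str, Any]],
--     sort_order: List[str]
-- ) -> List[Dict[str, Any]]:
--     """
--     Sort a list of model dictionaries based on a predefined name order.
--
--     Items not in the sort order will be placed at the end, in original order.
--
--     Args:
--         original_list: List of model dictionaries, each with a 'name' key.
--         sort_order: List of model names specifying the desired sort order.
--
--     Returns:
--         List of model dictionaries sorted by the specified order.
--     """
--     sort_order_dict = {value: index for index, value in enumerate(sort_order)}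
--     to_sort = [item for item in original_list if item["name"] in sort_order_dict]
--     to_keep = [item for item in original_list if item["name"] not in sort_order_dict]
--     sorted_items = sorted(to_sort, key=lambda x: sort_order_dict[x["name"]])
--     return sorted_items + to_keep
-- ===== SOURCE B (Python) =====
-- def sort_models(original_list, sort_order):
--     sort_order_dict = {value: index for index, value in enumerate(sort_order)}
--     sentinel = len(sort_order)
--     return sorted(original_list, key=lambda x: sort_order_dict.get(x["name"], sentinel))
-- ===== Notes on version B (the rewrite author's own statement) =====
-- stated objective: simpler
-- what changed: Replaces A's partition-into-two-lists-then-sort-and-concatenate with one stable sort of the whole list whose key maps unmatched names to the sentinel len(sort_order), so stability alone keeps unmatched items last in original order.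
import Mathlib
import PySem

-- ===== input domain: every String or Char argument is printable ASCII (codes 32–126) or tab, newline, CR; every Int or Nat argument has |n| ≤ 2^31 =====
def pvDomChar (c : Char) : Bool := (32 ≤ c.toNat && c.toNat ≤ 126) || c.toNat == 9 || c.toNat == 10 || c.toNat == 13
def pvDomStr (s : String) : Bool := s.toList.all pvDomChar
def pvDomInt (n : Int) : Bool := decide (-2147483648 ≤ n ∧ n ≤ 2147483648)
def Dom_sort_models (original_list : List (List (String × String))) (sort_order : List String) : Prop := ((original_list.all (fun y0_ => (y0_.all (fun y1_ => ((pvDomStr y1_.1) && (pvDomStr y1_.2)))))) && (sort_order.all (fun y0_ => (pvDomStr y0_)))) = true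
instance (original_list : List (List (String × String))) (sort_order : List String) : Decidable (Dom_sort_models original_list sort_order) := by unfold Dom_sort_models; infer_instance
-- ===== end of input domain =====

-- B replaces A's partition-then-sort-then-concatenate by a single stable sort of the whole
-- list with a sentinel key for unmatched names (objective: simpler); same return value on Pre_.

-- item["name"]  (Pre_ guarantees the key is present, so the default is never the result)
def pvName (item : List (String × String)) : String :=
  ((PySem.Dict.mk item).get? "name").getD ""

-- sort_order_dict = {value: index for index, value in enumerate(sort_order)}  (same line in A and B)
def pvBuildOrder (sort_order : List String) : PySem.Dict String Int :=
  (PySem.List.enumerate sort_order 0).foldl (fun d p => d.insert p.2 p.1) PySem.Dict.empty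

-- ===== PORT A =====
def sort_models (original_list : List (List (String × String))) (sort_order : List String) : List (List (String × String)) :=
  let sort_order_dict := pvBuildOrder sort_order
  let to_sort := original_list.filter (fun item => sort_order_dict.contains (pvName item))
  let to_keep := original_list.filter (fun item => !(sort_order_dict.contains (pvName item)))
  let sorted_items := PySem.List.sorted to_sort (fun x => (sort_order_dict.get? (pvName x)).getD 0) false
  sorted_items ++ to_keep

-- ===== PORT B =====
def sort_models_alt (original_list : List (List (String × String))) (sort_order : List String) : List (List (String × String)) :=
  let sort_order_dict := pvBuildOrder sort_order
  let sentinel : Int := (sort_order.length : Int)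
  PySem.List.sorted original_list (fun x => sort_order_dict.getD (pvName x) sentinel) false

-- ===== PRECONDITION & SPEC =====
-- Pre_ excludes exactly the inputs on which Python A raises KeyError (an item without a "name" key); B raises there too.
def Pre_sort_models (original_list : List (List (String × String))) (sort_order : List String) : Prop :=
  ∀ item ∈ original_list, "name" ∈ item.map Prod.fst

instance (original_list : List (List (String × String))) (sort_order : List String) : Decidable (Pre_sort_models original_list sort_order) := by unfold Pre_sort_models; infer_instance

def pvWitness_sort_models : (List (List (String × String))) × List String :=
  ([[("name", "b")], [("name", "z"), ("size", "7")], [("name", "a")]], ["a", "b"])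

def Spec_sort_models (original_list : List (List (String × String))) (sort_order : List String) (out : List (List (String × String))) : Prop := out = sort_models_alt original_list sort_order
instance (original_list : List (List (String × String))) (sort_order : List String) (out : List (List (String × String))) : Decidable (Spec_sort_models original_list sort_order out) := by unfold Spec_sort_models; infer_instance

-- ===== CLAIM (what is proved, stated in full; the proofs are below) =====
def Claim_equal_sort_models : Prop := ∀ (original_list : List (List (String × String))) (sort_order : List String), Dom_sort_models original_list sort_order → Pre_sort_models original_list sort_order → Spec_sort_models original_list sort_order (sort_models original_list sort_order)

-- ===== LEMMAS AND PROOFS =====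

-- every value stored by the enumerate-fold is below s + length
lemma buildOrder_val_lt (so : List String) : ∀ (s : Int) (d0 : PySem.Dict String Int),
    (∀ k r, d0.get? k = some r → r < s) →
    ∀ k r, ((PySem.List.enumerate so s).foldl (fun d p => d.insert p.2 p.1) d0).get? k = some r →
      r < s + (so.length : Int) := by
  induction so with
  | nil => intro s d0 h0 k r hr; simpa using h0 k r (by simpa [PySem.List.enumerate] using hr)
  | cons x xs ih =>
      intro s d0 h0 k r hr
      rw [PySem.List.enumerate_cons] at hr
      simp only [List.foldl_cons] at hr
      have h1 : ∀ k r, (d0.insert x s).get? k = some r → r < s + 1 := by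
        intro k r h
        rw [PySem.Dict.get?_insert] at h
        split at h
        · injection h with h'; omega
        · exact lt_trans (h0 k r h) (by omega)
      have hmain := ih (s + 1) (d0.insert x s) h1 k r hr
      simp only [List.length_cons]
      push_cast at hmain ⊢
      omega

-- insertion before a suffix every element of which goes after x
lemma insertBy_append_of_forall_before {α : Type} (before : α → α → Bool) (x : α) :
    ∀ (S K : List α), (∀ y ∈ K, before x y = true) →
      PySem.List.insertBy before x (S ++ K) = PySem.List.insertBy before x S ++ K := by
  intro S K hK
  induction S with
  | nil =>
      cases K with
      | nil => simp
      | cons y ys => simp [PySem.List.insertBy, hK y (by simp)]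
  | cons a S ih =>
      by_cases h : before x a = true
      · simp [PySem.List.insertBy, h]
      · simp only [Bool.not_eq_true] at h
        simp [PySem.List.insertBy, h, ih]

-- stable-sort partition: elements whose key is the strict maximum sentinel N stay at the end in order
lemma stable_split {α : Type} (k : α → Int) (N : Int) (hle : ∀ x, k x ≤ N) :
    ∀ (xs S K : List α), (∀ y ∈ K, k y = N) →
      xs.foldl (fun acc x => PySem.List.insertBy (fun a b => decide (k a < k b)) x acc) (S ++ K)
      = (xs.filter (fun x => decide (k x < N))).foldl
          (fun acc x => PySem.List.insertBy (fun a b => decide (k a < k b)) x acc) S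
        ++ K ++ xs.filter (fun x => !decide (k x < N)) := by
  intro xs
  induction xs with
  | nil => intro S K hK; simp
  | cons x xs ih =>
      intro S K hK
      by_cases hx : k x < N
      · have h1 : PySem.List.insertBy (fun a b => decide (k a < k b)) x (S ++ K)
            = PySem.List.insertBy (fun a b => decide (k a < k b)) x S ++ K :=
          insertBy_append_of_forall_before _ x S K (fun y hy => by simp [hK y hy, hx])
        simp only [List.foldl_cons, List.filter_cons, hx, decide_true, Bool.not_true, h1]
        simpa using ih (PySem.List.insertBy (fun a b => decide (k a < k b)) x S) K hK
      · have hxN : k x = N := le_antisymm (hle x) (by omega)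
        have h1 : PySem.List.insertBy (fun a b => decide (k a < k b)) x (S ++ K) = (S ++ K) ++ [x] :=
          PySem.List.insertBy_of_forall_not_before _ x (S ++ K)
            (fun y hy => by simpa using not_lt.mpr (hxN ▸ hle y))
        have hK' : ∀ y ∈ K ++ [x], k y = N := by
          intro y hy
          rcases List.mem_append.mp hy with h | h
          · exact hK y h
          · simpa [List.mem_singleton.mp h] using hxN
        simp only [List.foldl_cons, List.filter_cons, hx, decide_false, Bool.not_false, h1]
        rw [List.append_assoc S K [x]]
        rw [ih S (K ++ [x]) hK']
        simp
  -- (ends)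

lemma insertBy_congr {α : Type} (b1 b2 : α → α → Bool) (x : α) :
    ∀ ys, (∀ y ∈ ys, b1 x y = b2 x y) →
      PySem.List.insertBy b1 x ys = PySem.List.insertBy b2 x ys := by
  intro ys
  induction ys with
  | nil => intro _; rfl
  | cons y ys ih =>
      intro h
      have hy := h y (by simp)
      by_cases hb : b1 x y = true
      · simp [PySem.List.insertBy, hb, hy ▸ hb]
      · simp only [Bool.not_eq_true] at hb
        simp [PySem.List.insertBy, hb, hy ▸ hb, ih (fun z hz => h z (by simp [hz]))]

lemma sorted_key_congr {α : Type} (k1 k2 : α → Int) :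
    ∀ (xs acc : List α), (∀ x ∈ xs, k1 x = k2 x) → (∀ y ∈ acc, k1 y = k2 y) →
      xs.foldl (fun acc x => PySem.List.insertBy (fun a b => decide (k1 a < k1 b)) x acc) acc
      = xs.foldl (fun acc x => PySem.List.insertBy (fun a b => decide (k2 a < k2 b)) x acc) acc := by
  intro xs
  induction xs with
  | nil => intro acc _ _; rfl
  | cons x xs ih =>
      intro acc hxs hacc
      have hx := hxs x (by simp)
      have h1 : PySem.List.insertBy (fun a b => decide (k1 a < k1 b)) x acc
          = PySem.List.insertBy (fun a b => decide (k2 a < k2 b)) x acc :=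
        insertBy_congr _ _ x acc (fun y hy => by rw [hx, hacc y hy])
      simp only [List.foldl_cons, h1]
      exact ih _ (fun z hz => hxs z (by simp [hz]))
        (fun y hy => by
          rcases (PySem.List.mem_insertBy _ x y acc).mp hy with h | h
          · rw [h]; exact hx
          · exact hacc y h)

-- ===== VERDICT (by name: the statement is the Claim_ definition above) =====
theorem sort_models_spec : Claim_equal_sort_models := by
  intro ol so _ _
  show sort_models ol so = sort_models_alt ol so
  simp only [sort_models, sort_models_alt]
  set d := pvBuildOrder so with hd
  set N : Int := (so.length : Int) with hN
  set keyB : List (String × String) → Int := fun x => d.getD (pvName x) N with hkeyB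
  have hval : ∀ k r, d.get? k = some r → r < N := by
    intro k r h
    have := buildOrder_val_lt so 0 PySem.Dict.empty
      (by intro k r h; simp [PySem.Dict.get?_empty] at h) k r (by simpa [pvBuildOrder] using h)
    simpa using this
  have hle : ∀ x, keyB x ≤ N := by
    intro x
    simp only [hkeyB, PySem.Dict.getD_eq_get?_getD]
    cases hg : d.get? (pvName x) with
    | none => simp
    | some r => simpa using le_of_lt (hval _ r hg)
  have hmatch : ∀ x, d.contains (pvName x) = decide (keyB x < N) := by
    intro x
    simp only [hkeyB, PySem.Dict.getD_eq_get?_getD]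
    rw [PySem.Dict.contains_eq_isSome_get?]
    cases hg : d.get? (pvName x) with
    | none => simp
    | some r => simp [hval _ r hg]
  -- B as a partition via stability
  have hsplit := stable_split keyB N hle ol [] []
    (by intro y hy; simp at hy)
  simp only [List.append_nil] at hsplit
  rw [PySem.List.sorted_eq_foldl_insertBy ol keyB, hsplit]
  -- identify the two filters
  have hf1 : ol.filter (fun x => decide (keyB x < N)) = ol.filter (fun item => d.contains (pvName item)) :=
    List.filter_congr (fun x _ => (hmatch x).symm)
  have hf2 : ol.filter (fun x => !decide (keyB x < N)) = ol.filter (fun item => !(d.contains (pvName item))) :=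
    List.filter_congr (fun x _ => by rw [hmatch x])
  rw [hf1, hf2]
  -- on matched items, A's key (default 0) and B's key (default N) agree
  have hcong : (ol.filter (fun item => d.contains (pvName item))).foldl
        (fun acc x => PySem.List.insertBy (fun a b => decide ((fun y => (d.get? (pvName y)).getD 0) a < (fun y => (d.get? (pvName y)).getD 0) b)) x acc) []
      = (ol.filter (fun item => d.contains (pvName item))).foldl
        (fun acc x => PySem.List.insertBy (fun a b => decide (keyB a < keyB b)) x acc) [] := by
    apply sorted_key_congr
    · intro x hx
      have hc : d.contains (pvName x) = true := by
        simpa using (List.mem_filter.mp hx).2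
      rw [PySem.Dict.contains_eq_isSome_get?] at hc
      cases hg : d.get? (pvName x) with
      | none => rw [hg] at hc; simp at hc
      | some r => simp [hkeyB, PySem.Dict.getD_eq_get?_getD, hg]
    · intro y hy; simp at hy
  rw [PySem.List.sorted_eq_foldl_insertBy, hcong]
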